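-- pv_equiv track=rewrite | github.com/awslabs/content-accessibility-utility-on-aws | content_accessibility_utility_on_aws/report/vpat_generator.py | _determine_conformance_level
-- ===== SOURCE A (Python) =====
-- from typing import Dict, List, Any, Optional
--
-- def _determine_conformance_level(issues: List[Dict[str, Any]]) -> str:
--     """
--     Determine conformance level based on issues found.
--
--     Args:
--         issues: List of issues for a criterion
--
--     Returns:
--         Conformance level string
--     """
--     if not issues:
--         return "supports"
--
--     # Check if any issues remain unremediated
--     unremediated = [
--         i for i in issues
--         if i.get("remediation_status", "needs_remediation") != "remediated"
--     ]
--
--     if not unremediated: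
--         return "supports"
--
--     # Count by severity
--     critical_count = sum(1 for i in unremediated if i.get("severity") == "critical")
--     major_count = sum(1 for i in unremediated if i.get("severity") == "major")
--     minor_count = sum(1 for i in unremediated if i.get("severity") == "minor")
--
--     # Determine conformance level based on severity distribution
--     if critical_count > 0:
--         return "does_not_support"
--     elif major_count > 2:
--         return "does_not_support"
--     elif major_count > 0 or minor_count > 2:
--         return "partially_supports"
--     else:
--         return "partially_supports"
-- ===== SOURCE B (Python) =====
-- def _determine_conformance_level(issues):
--     """Map each unremediated issue to a numeric weight and decide by a single
--     threshold on the total, instead of branching on per-severity counts: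
--     critical = 3, major = 1, anything else = 0; total >= 3 means does_not_support."""
--     weight = {"critical": 3, "major": 1}
--     scores = [
--         weight.get(i.get("severity"), 0)
--         for i in issues
--         if i.get("remediation_status", "needs_remediation") != "remediated"
--     ]
--     if not scores:
--         return "supports"
--     return "does_not_support" if sum(scores) >= 3 else "partially_supports"
-- ===== Notes on version B (the rewrite author's own statement) =====
-- stated objective: simpler
-- what changed: Replaced the per-severity counts and branch chain by an arithmetic formulation: each unremediated issue is mapped to a numeric weight (critical=3, major=1, else 0) and the level is decided by a single threshold on the weight sum, which collapses the critical>0 / major>2 / fallthrough branches into one comparison.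
import Mathlib
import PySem

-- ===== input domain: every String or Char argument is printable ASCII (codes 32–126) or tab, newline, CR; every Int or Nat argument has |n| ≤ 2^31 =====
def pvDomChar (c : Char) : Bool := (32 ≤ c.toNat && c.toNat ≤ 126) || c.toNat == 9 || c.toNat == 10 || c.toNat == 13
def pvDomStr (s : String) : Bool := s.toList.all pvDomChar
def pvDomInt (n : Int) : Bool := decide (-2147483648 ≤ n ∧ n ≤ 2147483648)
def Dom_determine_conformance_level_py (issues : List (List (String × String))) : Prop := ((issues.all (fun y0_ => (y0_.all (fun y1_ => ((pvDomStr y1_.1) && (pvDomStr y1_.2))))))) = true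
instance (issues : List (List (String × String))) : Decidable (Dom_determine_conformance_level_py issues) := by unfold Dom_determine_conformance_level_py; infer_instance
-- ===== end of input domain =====

-- B replaces A's per-severity counts and branch chain by a weight map (critical=3, major=1, else 0) and one threshold on the weight sum (objective: simpler).


-- dict.get(k) / dict.get(k, dflt) on the association-list encoding (lookup = first match)
def pvGetOpt (d : List (String × String)) (k : String) : Option String :=
  (d.find? (fun p => p.1 == k)).map (·.2)

def pvGetD (d : List (String × String)) (k dflt : String) : String :=
  (pvGetOpt d k).getD dflt

-- ===== PORT A =====
def determine_conformance_level_py (issues : List (List (String × String))) : String :=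
  if issues.isEmpty then "supports"
  else
    let unremediated := issues.filter (fun i => pvGetD i "remediation_status" "needs_remediation" != "remediated")
    if unremediated.isEmpty then "supports"
    else
      let critical_count := (unremediated.filter (fun i => pvGetOpt i "severity" == some "critical")).length
      let major_count := (unremediated.filter (fun i => pvGetOpt i "severity" == some "major")).length
      let minor_count := (unremediated.filter (fun i => pvGetOpt i "severity" == some "minor")).length
      if critical_count > 0 then "does_not_support"
      else if major_count > 2 then "does_not_support"
      else if major_count > 0 ∨ minor_count > 2 then "partially_supports"
      else "partially_supports"

-- ===== PORT B =====
-- weight.get(sev, 0): the weight dict {"critical": 3, "major": 1} looked up with a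
-- possibly-missing key (None or any other string falls through to the default 0)
def pvWeightGet (sev : Option String) : Nat :=
  match sev with
  | some s => if s == "critical" then 3 else if s == "major" then 1 else 0
  | none => 0

def determine_conformance_level_py_alt (issues : List (List (String × String))) : String :=
  let scores := (issues.filter (fun i => pvGetD i "remediation_status" "needs_remediation" != "remediated")).map
    (fun i => pvWeightGet (pvGetOpt i "severity"))
  if scores.isEmpty then "supports"
  else if scores.sum ≥ 3 then "does_not_support"
  else "partially_supports"

-- ===== PRECONDITION & SPEC =====
def Spec_determine_conformance_level_py (issues : List (List (String × String))) (out : String) : Prop := out = determine_conformance_level_py_alt issues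
instance (issues : List (List (String × String))) (out : String) : Decidable (Spec_determine_conformance_level_py issues out) := by unfold Spec_determine_conformance_level_py; infer_instance

-- ===== CLAIM (what is proved, stated in full; the proofs are below) =====
def Claim_equal_determine_conformance_level_py : Prop := ∀ (issues : List (List (String × String))), Dom_determine_conformance_level_py issues → Spec_determine_conformance_level_py issues (determine_conformance_level_py issues)

-- ===== LEMMAS AND PROOFS =====

-- the weight sum decomposes into 3·(#critical) + (#major)
theorem pvSum_weights (l : List (List (String × String))) :
    (l.map (fun i => pvWeightGet (pvGetOpt i "severity"))).sum =
      3 * (l.filter (fun i => pvGetOpt i "severity" == some "critical")).length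
      + (l.filter (fun i => pvGetOpt i "severity" == some "major")).length := by
  induction l with
  | nil => simp
  | cons hd tl ih =>
    simp only [List.map_cons, List.sum_cons, List.filter_cons, ih]
    by_cases hc : pvGetOpt hd "severity" = some "critical"
    · have hm : (pvGetOpt hd "severity" == some "major") = false := by rw [hc]; decide
      rw [show (pvGetOpt hd "severity" == some "critical") = true from beq_iff_eq.mpr hc, hm]
      simp [pvWeightGet, hc]; ring
    · have hc' : (pvGetOpt hd "severity" == some "critical") = false := beq_eq_false_iff_ne.mpr hc
      rw [hc']
      by_cases hm : pvGetOpt hd "severity" = some "major"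
      · rw [show (pvGetOpt hd "severity" == some "major") = true from beq_iff_eq.mpr hm]
        have : pvWeightGet (pvGetOpt hd "severity") = 1 := by
          rw [hm]; simp [pvWeightGet]
        rw [this]; simp; omega
      · have hm' : (pvGetOpt hd "severity" == some "major") = false := beq_eq_false_iff_ne.mpr hm
        rw [hm']
        have : pvWeightGet (pvGetOpt hd "severity") = 0 := by
          match h : pvGetOpt hd "severity" with
          | none => simp [pvWeightGet]
          | some s =>
            rw [h] at hc hm
            have hs1 : s ≠ "critical" := fun h1 => hc (by rw [h1])
            have hs2 : s ≠ "major" := fun h1 => hm (by rw [h1])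
            simp [pvWeightGet, hs1, hs2]
        rw [this]; simp

-- ===== VERDICT (by name: the statement is the Claim_ definition above) =====
theorem determine_conformance_level_py_spec : Claim_equal_determine_conformance_level_py := by
  intro issues _
  show determine_conformance_level_py issues = determine_conformance_level_py_alt issues
  unfold determine_conformance_level_py determine_conformance_level_py_alt
  set u := issues.filter (fun i => pvGetD i "remediation_status" "needs_remediation" != "remediated") with hu
  by_cases he : issues.isEmpty
  · have : issues = [] := List.isEmpty_iff.mp he
    subst this; simp [hu]
  · rw [if_neg he]
    by_cases hue : u.isEmpty
    · rw [if_pos hue]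
      have : u = [] := List.isEmpty_iff.mp hue
      rw [this]; simp
    · rw [if_neg hue]
      have hmape : (u.map (fun i => pvWeightGet (pvGetOpt i "severity"))).isEmpty = false := by
        rw [List.isEmpty_map]
        exact Bool.eq_false_iff.mpr hue
      simp only [hmape, Bool.false_eq_true, if_false, pvSum_weights]
      set c := (u.filter (fun i => pvGetOpt i "severity" == some "critical")).length
      set m := (u.filter (fun i => pvGetOpt i "severity" == some "major")).length
      by_cases hc : c > 0
      · rw [if_pos hc, if_pos (by omega : 3 * c + m ≥ 3)]
      · rw [if_neg hc]
        by_cases hm : m > 2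
        · rw [if_pos hm, if_pos (by omega : 3 * c + m ≥ 3)]
        · rw [if_neg hm, if_neg (by omega : ¬ (3 * c + m ≥ 3))]
          simp
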